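-- pv_equiv track=rewrite | github.com/diego-famaf/Programacion2ITS | UNIDAD 4 - Recursion y paradigma funcional/ejercicios_recursion_entrenamiento.py | concatenar
-- ===== SOURCE A (Python) =====
-- def concatenar(l1:list,l2:list)->list:
--     if l2==[] :
--         solucion = l1
--     elif l1==[]:
--         solucion = l2
--     else:
--         solucion = [l1[0]] + concatenar(l1[1:],l2)
--     return solucion
-- ===== SOURCE B (Python) =====
-- def concatenar(l1: list, l2: list) -> list:
--     result = list(l1)
--     for x in l2:
--         result.append(x)
--     return result
-- ===== Notes on version B (the rewrite author's own statement) =====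
-- stated objective: faster
-- what changed: Replaces A's head/tail recursion with repeated list building ([l1[0]] + recurse) by a single forward pass that copies l1 and appends each element of l2.
import Mathlib
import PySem

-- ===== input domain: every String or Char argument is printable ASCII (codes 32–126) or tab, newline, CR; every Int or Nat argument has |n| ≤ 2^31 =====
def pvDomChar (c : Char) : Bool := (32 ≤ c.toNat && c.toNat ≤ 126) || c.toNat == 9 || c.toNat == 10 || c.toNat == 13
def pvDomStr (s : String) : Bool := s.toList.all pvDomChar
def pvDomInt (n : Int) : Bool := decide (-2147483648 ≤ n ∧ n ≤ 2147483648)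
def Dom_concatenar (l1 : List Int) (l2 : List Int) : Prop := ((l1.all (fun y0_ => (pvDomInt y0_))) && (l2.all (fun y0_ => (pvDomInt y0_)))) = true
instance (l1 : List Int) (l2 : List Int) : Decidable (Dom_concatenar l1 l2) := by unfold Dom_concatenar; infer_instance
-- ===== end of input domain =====

-- B replaces A's quadratic recursion (prepending the head to a recursive concatenation) with a single linear pass appending l2's elements to a copy of l1 (objective: faster).

-- ===== PORT A =====
def concatenar (l1 : List Int) (l2 : List Int) : List Int :=
  if l2 = [] then l1
  else if l1 = [] then l2
  else match l1 with
  | [] => l2   -- unreachable: l1 ≠ [] in this branch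
  | h :: t => [h] ++ concatenar t l2

-- ===== PORT B =====
def concatenar_alt (l1 : List Int) (l2 : List Int) : List Int :=
  l2.foldl (fun result x => result ++ [x]) l1

-- ===== PRECONDITION & SPEC =====
def Spec_concatenar (l1 : List Int) (l2 : List Int) (out : List Int) : Prop := out = concatenar_alt l1 l2
instance (l1 : List Int) (l2 : List Int) (out : List Int) : Decidable (Spec_concatenar l1 l2 out) := by unfold Spec_concatenar; infer_instance

-- ===== CLAIM (what is proved, stated in full; the proofs are below) =====
def Claim_equal_concatenar : Prop := ∀ (l1 : List Int) (l2 : List Int), Dom_concatenar l1 l2 → Spec_concatenar l1 l2 (concatenar l1 l2)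

-- ===== LEMMAS AND PROOFS =====

-- ===== VERDICT (by name: the statement is the Claim_ definition above) =====
theorem foldl_snoc (l2 : List Int) : ∀ acc : List Int,
    l2.foldl (fun result x => result ++ [x]) acc = acc ++ l2 := by
  induction l2 with
  | nil => simp
  | cons h t ih => intro acc; simp [List.foldl, ih]

theorem concatenar_eq_append (l1 l2 : List Int) : concatenar l1 l2 = l1 ++ l2 := by
  induction l1 with
  | nil => simp [concatenar]
  | cons h t ih =>
    by_cases h2 : l2 = []
    · simp [concatenar, h2]
    · simp [concatenar, h2, ih]

theorem concatenar_spec : Claim_equal_concatenar := by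
  intro l1 l2 _
  unfold Spec_concatenar concatenar_alt
  rw [foldl_snoc, concatenar_eq_append]
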